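-- pv_equiv track=rewrite | github.com/YuSawan/mix-blink | scripts/zelda.py | _conll_tags_to_spans
-- ===== SOURCE A (Python) =====
-- from typing import Any, Iterable, Union
--
-- def _conll_tags_to_spans(tags: Iterable[str], links: Iterable[str]) -> Iterable[tuple[int, int, str, str]]:
--     # NOTE: assume BIO scheme
--     start, label = -1, None
--     for i, (tag, link) in enumerate(zip(list(tags) + ["O"], list(links) + ["O"])):
--         if tag == "O":
--             if start >= 0:
--                 assert label is not None
--                 yield (start, i, label, link)
--                 start, label = -1, None
--         else:
--             cur_label = tag[2:]
--             if tag.startswith("B"):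
--                 if start >= 0:
--                     assert label is not None
--                     yield (start, i, label, link)
--                 start, label = i, cur_label
--             else:
--                 if cur_label != label:
--                     if start >= 0:
--                         assert label is not None
--                         yield (start, i, label, link)
--                     start, label = i, cur_label
-- ===== SOURCE B (Python) =====
-- def _conll_tags_to_spans(tags, links):
--     # Boundary-detection algorithm: no running (start, label) state machine.
--     # A position i is "chained" to i-1 by a purely local comparison of the two
--     # adjacent tags; spans are exactly the maximal chained runs of non-"O"
--     # positions.  We list all span starts (non-"O", not chained), extend each
--     # start forward while chained to find its close index, and emit the link
--     # found at the close index.  A span whose close index falls outside the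
--     # (zip-truncated, "O"-extended) sequence is never closed, hence not emitted.
--     ts = list(tags) + ["O"]
--     ls = list(links) + ["O"]
--     n = min(len(ts), len(ls))
--
--     def chained(i):
--         return (0 < i and ts[i - 1] != "O" and ts[i] != "O"
--                 and not ts[i].startswith("B")
--                 and ts[i][2:] == ts[i - 1][2:])
--
--     starts = [i for i in range(n) if ts[i] != "O" and not chained(i)]
--     for s in starts:
--         e = s + 1
--         while e < n and chained(e):
--             e += 1
--         if e < n:
--             yield (s, e, ts[s][2:], ls[e])
-- ===== Notes on version B (the rewrite author's own statement) =====
-- stated objective: alternative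
-- what changed: Replaces A's sequential (start,label) state machine by stateless boundary detection: a local 'chained(i)' predicate comparing only adjacent tags defines span starts (non-O, unchained positions), each start is extended forward while chained to find its close index, and the link is read at that index.
import Mathlib
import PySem

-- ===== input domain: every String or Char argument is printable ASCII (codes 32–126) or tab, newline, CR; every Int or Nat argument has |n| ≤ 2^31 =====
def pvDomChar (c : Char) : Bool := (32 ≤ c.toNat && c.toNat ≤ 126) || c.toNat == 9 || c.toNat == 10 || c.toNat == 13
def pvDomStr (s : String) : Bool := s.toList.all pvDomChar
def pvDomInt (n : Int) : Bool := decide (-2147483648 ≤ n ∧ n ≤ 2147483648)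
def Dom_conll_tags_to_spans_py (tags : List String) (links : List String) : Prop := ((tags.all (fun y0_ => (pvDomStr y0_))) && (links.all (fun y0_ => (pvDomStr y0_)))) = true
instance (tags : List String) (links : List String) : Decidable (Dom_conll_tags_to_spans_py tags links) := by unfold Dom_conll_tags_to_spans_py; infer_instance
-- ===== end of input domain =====

-- B replaces A's sequential (start, label) state machine by stateless boundary
-- detection (local adjacent-tag comparison + forward extension of each start);
-- objective: alternative algorithm of the same cost, not speed.

-- ===== PORT A =====
-- A: one fused loop over enumerate(zip(tags+["O"], links+["O"])), yielding (start, i, label, link).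
def conll_tags_to_spans_py (tags : List String) (links : List String) : List (Int × Int × String × String) :=
  let zipped := List.zip (tags ++ ["O"]) (links ++ ["O"])
  let fin := (PySem.List.enumerate zipped 0).foldl
    (fun (st : Int × Option String × List (Int × Int × String × String)) p =>
      let i := p.1; let tag := p.2.1; let link := p.2.2
      let start := st.1; let label := st.2.1; let acc := st.2.2
      if tag == "O" then
        if start ≥ 0 then (-1, none, acc ++ [(start, i, label.getD "", link)])
        else st
      else
        let cur := PySem.Str.slice tag (some 2) none   -- tag[2:]
        if PySem.Str.startswith tag "B" then
          if start ≥ 0 then (i, some cur, acc ++ [(start, i, label.getD "", link)])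
          else (i, some cur, acc)
        else
          if some cur ≠ label then
            if start ≥ 0 then (i, some cur, acc ++ [(start, i, label.getD "", link)])
            else (i, some cur, acc)
          else st)
    (-1, none, [])
  fin.2.2

-- ===== PORT B =====
-- B helpers, transliterating Source B: the local predicate `chained`, and the
-- `while e < n and chained(e)` loop.  List indexing ts[i] is ported as
-- `List.getD _ ""`: every index used is in range, so the default is never read.
def pvChained (ts : List String) (i : Nat) : Bool :=
  decide (0 < i) && (ts.getD (i - 1) "" != "O") && (ts.getD i "" != "O")
    && !(PySem.Str.startswith (ts.getD i "") "B")
    && (PySem.Str.slice (ts.getD i "") (some 2) none == PySem.Str.slice (ts.getD (i - 1) "") (some 2) none)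

def pvFindEnd (ts : List String) (n : Nat) (e : Nat) : Nat :=
  if h : e < n ∧ pvChained ts e = true then pvFindEnd ts n (e + 1) else e
termination_by n - e
decreasing_by omega

-- B: span starts = non-"O" positions not chained to their predecessor; each
-- start is extended forward while chained; emit with the link at the close index.
def conll_tags_to_spans_py_alt (tags : List String) (links : List String) : List (Int × Int × String × String) :=
  let ts := tags ++ ["O"]
  let ls := links ++ ["O"]
  let n := min ts.length ls.length
  let starts := (List.range n).filter (fun i => (ts.getD i "" != "O") && !pvChained ts i)
  starts.filterMap (fun s =>
    let e := pvFindEnd ts n (s + 1)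
    if e < n then
      some ((s : Int), (e : Int), PySem.Str.slice (ts.getD s "") (some 2) none, ls.getD e "")
    else none)

-- ===== PRECONDITION & SPEC =====
def Spec_conll_tags_to_spans_py (tags : List String) (links : List String) (out : List (Int × Int × String × String)) : Prop := out = conll_tags_to_spans_py_alt tags links
instance (tags : List String) (links : List String) (out : List (Int × Int × String × String)) : Decidable (Spec_conll_tags_to_spans_py tags links out) := by unfold Spec_conll_tags_to_spans_py; infer_instance

-- ===== CLAIM (what is proved, stated in full; the proofs are below) =====
def Claim_equal_conll_tags_to_spans_py : Prop := ∀ (tags : List String) (links : List String), Dom_conll_tags_to_spans_py tags links → Spec_conll_tags_to_spans_py tags links (conll_tags_to_spans_py tags links)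

-- ===== LEMMAS AND PROOFS =====

-- Recursive restatement of A's fused loop body over the enumerated list.
def pvRunL : List (Int × String × String) → Int → Option String → List (Int × Int × String × String)
  | [], _, _ => []
  | (i, tag, link) :: rest, start, label =>
    if tag == "O" then
      if start ≥ 0 then (start, i, label.getD "", link) :: pvRunL rest (-1) none
      else pvRunL rest start label
    else
      let cur := PySem.Str.slice tag (some 2) none
      if PySem.Str.startswith tag "B" then
        if start ≥ 0 then (start, i, label.getD "", link) :: pvRunL rest i (some cur)
        else pvRunL rest i (some cur)
      else
        if some cur ≠ label then
          if start ≥ 0 then (start, i, label.getD "", link) :: pvRunL rest i (some cur)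
          else pvRunL rest i (some cur)
        else pvRunL rest start label

-- Index-based restatement of A's loop over ts/ls with bound n.
def pvRunA (ts ls : List String) (n j : Nat) (start : Int) (label : Option String) :
    List (Int × Int × String × String) :=
  if h : j < n then
    if ts.getD j "" == "O" then
      if start ≥ 0 then
        (start, (j : Int), label.getD "", ls.getD j "") :: pvRunA ts ls n (j + 1) (-1) none
      else pvRunA ts ls n (j + 1) start label
    else if PySem.Str.startswith (ts.getD j "") "B" then
      if start ≥ 0 then
        (start, (j : Int), label.getD "", ls.getD j "") ::
          pvRunA ts ls n (j + 1) (j : Int) (some (PySem.Str.slice (ts.getD j "") (some 2) none))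
      else pvRunA ts ls n (j + 1) (j : Int) (some (PySem.Str.slice (ts.getD j "") (some 2) none))
    else if some (PySem.Str.slice (ts.getD j "") (some 2) none) ≠ label then
      if start ≥ 0 then
        (start, (j : Int), label.getD "", ls.getD j "") ::
          pvRunA ts ls n (j + 1) (j : Int) (some (PySem.Str.slice (ts.getD j "") (some 2) none))
      else pvRunA ts ls n (j + 1) (j : Int) (some (PySem.Str.slice (ts.getD j "") (some 2) none))
    else pvRunA ts ls n (j + 1) start label
  else []
termination_by n - j
decreasing_by all_goals omega

def pvStartP (ts : List String) (i : Nat) : Bool :=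
  (ts.getD i "" != "O") && !pvChained ts i

-- B's output for starts in [j, n).
def pvOutB (ts ls : List String) (n j : Nat) : List (Int × Int × String × String) :=
  ((List.range' j (n - j)).filter (pvStartP ts)).filterMap (fun s =>
    let e := pvFindEnd ts n (s + 1)
    if e < n then
      some ((s : Int), (e : Int), PySem.Str.slice (ts.getD s "") (some 2) none, ls.getD e "")
    else none)

lemma pvFoldA (l : List (Int × String × String)) :
    ∀ (start : Int) (label : Option String) (acc : List (Int × Int × String × String)),
    (l.foldl (fun (st : Int × Option String × List (Int × Int × String × String)) p =>
      let i := p.1; let tag := p.2.1; let link := p.2.2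
      let start := st.1; let label := st.2.1; let acc := st.2.2
      if tag == "O" then
        if start ≥ 0 then (-1, none, acc ++ [(start, i, label.getD "", link)])
        else st
      else
        let cur := PySem.Str.slice tag (some 2) none
        if PySem.Str.startswith tag "B" then
          if start ≥ 0 then (i, some cur, acc ++ [(start, i, label.getD "", link)])
          else (i, some cur, acc)
        else
          if some cur ≠ label then
            if start ≥ 0 then (i, some cur, acc ++ [(start, i, label.getD "", link)])
            else (i, some cur, acc)
          else st) (start, label, acc)).2.2 = acc ++ pvRunL l start label := by
  induction l with
  | nil => intro start label acc; simp [pvRunL]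
  | cons hd tl ih =>
    intro start label acc
    obtain ⟨i, tag, link⟩ := hd
    simp only [List.foldl_cons, pvRunL]
    split_ifs <;> rw [ih] <;> simp


lemma pvBridgeA (ts ls : List String) (n : Nat) (hn : n = min ts.length ls.length) :
    ∀ j s lab, pvRunL (PySem.List.enumerate ((ts.zip ls).drop j) (j : Int)) s lab
      = pvRunA ts ls n j s lab := by
  suffices H : ∀ k j, n - j ≤ k → ∀ (s : Int) (lab : Option String),
      pvRunL (PySem.List.enumerate ((ts.zip ls).drop j) (j : Int)) s lab
        = pvRunA ts ls n j s lab by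
    intro j; exact H (n - j) j le_rfl
  intro k
  induction k with
  | zero =>
    intro j hk s lab
    have hzl : (ts.zip ls).length = n := by simp [List.length_zip, hn]
    have hge : n ≤ j := by omega
    have hdrop : (ts.zip ls).drop j = [] := List.drop_eq_nil_of_le (by omega)
    rw [hdrop, pvRunA]
    simp [PySem.List.enumerate, pvRunL, show ¬ j < n by omega]
  | succ k ih =>
    intro j hk s lab
    by_cases hjn : j < n
    · have hzl : (ts.zip ls).length = n := by simp [List.length_zip, hn]
      have hjz : j < (ts.zip ls).length := by omega
      have hdrop : (ts.zip ls).drop j = (ts.zip ls)[j] :: (ts.zip ls).drop (j + 1) :=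
        List.drop_eq_getElem_cons hjz
      have hjt : j < ts.length := by omega
      have hjl : j < ls.length := by omega
      have hget : (ts.zip ls)[j] = (ts[j], ls[j]) := List.getElem_zip ..
      have hgt : ts.getD j "" = ts[j] := by
        rw [List.getD_eq_getElem?_getD, List.getElem?_eq_getElem hjt]; rfl
      have hgl : ls.getD j "" = ls[j] := by
        rw [List.getD_eq_getElem?_getD, List.getElem?_eq_getElem hjl]; rfl
      have hcast : (j : Int) + 1 = ((j + 1 : Nat) : Int) := by push_cast; ring
      have ihj := fun s lab => ih (j + 1) (by omega) s lab
      rw [hdrop, hget, PySem.List.enumerate_cons]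
      rw [pvRunA]
      simp only [hjn, dif_pos, pvRunL, hgt, hgl, hcast, ihj]
    · have hdrop : (ts.zip ls).drop j = [] :=
        List.drop_eq_nil_of_le (by simp [List.length_zip]; omega)
      rw [hdrop, pvRunA]
      simp [PySem.List.enumerate, pvRunL, hjn]

lemma pvOutB_stop (ts ls : List String) (n j : Nat) (h : ¬ j < n) :
    pvOutB ts ls n j = [] := by
  have : n - j = 0 := by omega
  simp [pvOutB, this]

lemma pvOutB_step (ts ls : List String) (n j : Nat) (h : j < n) :
    pvOutB ts ls n j =
      (if pvStartP ts j then
        (let e := pvFindEnd ts n (j + 1);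
         if e < n then
           [((j : Int), (e : Int), PySem.Str.slice (ts.getD j "") (some 2) none, ls.getD e "")]
         else [])
       else []) ++ pvOutB ts ls n (j + 1) := by
  have h1 : n - j = (n - (j + 1)) + 1 := by omega
  rw [pvOutB, h1, List.range'_succ]
  by_cases hs : pvStartP ts j = true
  · by_cases he : pvFindEnd ts n (j + 1) < n
    · simp [List.filter_cons, hs, pvOutB, List.filterMap_cons, he]
    · simp [List.filter_cons, hs, pvOutB, List.filterMap_cons, he]
  · simp [List.filter_cons, hs, pvOutB]

lemma pvOutB_skip (ts ls : List String) (n : Nat) (a b : Nat) (hab : a ≤ b)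
    (hf : ∀ i, a ≤ i → i < b → pvStartP ts i = false) :
    pvOutB ts ls n a = pvOutB ts ls n b := by
  induction b, hab using Nat.le_induction with
  | base => rfl
  | succ b hab ih =>
    rw [ih (fun i h1 h2 => hf i h1 (by omega))]
    by_cases hb : b < n
    · rw [pvOutB_step ts ls n b hb, hf b hab (by omega)]
      simp
    · rw [pvOutB_stop ts ls n b hb, pvOutB_stop ts ls n (b + 1) (by omega)]

-- findEnd basic facts
lemma pvFindEnd_eq_of_chained (ts : List String) (n j : Nat)
    (h : j < n ∧ pvChained ts j = true) :
    pvFindEnd ts n j = pvFindEnd ts n (j + 1) := by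
  rw [pvFindEnd, dif_pos h]

lemma pvFindEnd_eq_self (ts : List String) (n j : Nat)
    (h : ¬ (j < n ∧ pvChained ts j = true)) :
    pvFindEnd ts n j = j := by
  rw [pvFindEnd, dif_neg h]

lemma pvFindEnd_ge (ts : List String) (n : Nat) (j : Nat) : j ≤ pvFindEnd ts n j := by
  induction j using pvFindEnd.induct ts n with
  | case1 e h ih => rw [pvFindEnd, dif_pos h]; omega
  | case2 e h => rw [pvFindEnd, dif_neg h]

lemma pvFindEnd_chained (ts : List String) (n : Nat) (j : Nat) :
    ∀ i, j ≤ i → i < pvFindEnd ts n j → (i < n ∧ pvChained ts i = true) := by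
  induction j using pvFindEnd.induct ts n with
  | case1 e h ih =>
    intro i h1 h2
    rcases Nat.eq_or_lt_of_le h1 with rfl | hlt
    · exact h
    · exact ih i (by omega) (by rwa [← pvFindEnd_eq_of_chained ts n e h])
  | case2 e h =>
    intro i h1 h2
    rw [pvFindEnd_eq_self ts n e h] at h2
    omega

lemma pvStartP_false_of_chained (ts : List String) (i : Nat) (h : pvChained ts i = true) :
    pvStartP ts i = false := by
  simp [pvStartP, h]

lemma pvSkipRun (ts ls : List String) (n j : Nat) (hj : j ≤ n) :
    pvOutB ts ls n (j + 1) = pvOutB ts ls n (pvFindEnd ts n (j + 1)) := by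
  by_cases hjn : j + 1 ≤ n
  · refine pvOutB_skip ts ls n (j + 1) _ (pvFindEnd_ge ts n (j + 1)) ?_
    intro i h1 h2
    exact pvStartP_false_of_chained ts i (pvFindEnd_chained ts n (j + 1) i h1 h2).2
  · have : j + 1 = n + 1 := by omega
    rw [pvFindEnd_eq_self ts n (j + 1) (by omega)]

lemma pvRunA_stop (ts ls : List String) (n j : Nat) (h : ¬ j < n)
    (s : Int) (lab : Option String) : pvRunA ts ls n j s lab = [] := by
  rw [pvRunA]; simp [h]

-- The main correspondence, by strong induction on n - j.
lemma pvMain (ts ls : List String) (n : Nat) (hn : n ≤ ts.length) :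
    ∀ j, j ≤ n →
      ((j = 0 ∨ ts.getD (j - 1) "" = "O") →
        pvRunA ts ls n j (-1) none = pvOutB ts ls n j) ∧
      (∀ s : Int, s ≥ 0 → 1 ≤ j → ¬ ts.getD (j - 1) "" = "O" →
        pvRunA ts ls n j s (some (PySem.Str.slice (ts.getD (j - 1) "") (some 2) none)) =
          (if pvFindEnd ts n j < n then
              [(s, ((pvFindEnd ts n j : Nat) : Int),
                PySem.Str.slice (ts.getD (j - 1) "") (some 2) none,
                ls.getD (pvFindEnd ts n j) "")]
            else []) ++ pvOutB ts ls n (pvFindEnd ts n j)) := by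
  suffices H : ∀ k j, n - j ≤ k → j ≤ n →
      ((j = 0 ∨ ts.getD (j - 1) "" = "O") →
        pvRunA ts ls n j (-1) none = pvOutB ts ls n j) ∧
      (∀ s : Int, s ≥ 0 → 1 ≤ j → ¬ ts.getD (j - 1) "" = "O" →
        pvRunA ts ls n j s (some (PySem.Str.slice (ts.getD (j - 1) "") (some 2) none)) =
          (if pvFindEnd ts n j < n then
              [(s, ((pvFindEnd ts n j : Nat) : Int),
                PySem.Str.slice (ts.getD (j - 1) "") (some 2) none,
                ls.getD (pvFindEnd ts n j) "")]
            else []) ++ pvOutB ts ls n (pvFindEnd ts n j)) by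
    intro j hj; exact H (n - j) j le_rfl hj
  intro k
  induction k with
  | zero =>
    intro j hk hj
    have hjn : j = n := by omega
    subst hjn
    have hstop : ¬ j < j := lt_irrefl j
    refine ⟨fun _ => ?_, fun s hs h1 hprev => ?_⟩
    · rw [pvRunA_stop ts ls j j hstop, pvOutB_stop ts ls j j hstop]
    · have he : pvFindEnd ts j j = j := pvFindEnd_eq_self ts j j (by simp)
      rw [pvRunA_stop ts ls j j hstop, he, pvOutB_stop ts ls j j hstop]
      simp
  | succ k ih =>
    intro j hk hj
    by_cases hjn : j < n
    · have IH := ih (j + 1) (by omega) (by omega)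
      -- shared helper: opening a new span at j (tag ≠ "O", not chained)
      have hopen : ts.getD j "" ≠ "O" → pvChained ts j = false →
          pvRunA ts ls n (j + 1) (j : Int)
              (some (PySem.Str.slice (ts.getD j "") (some 2) none)) =
            pvOutB ts ls n j := by
        intro hne hch
        have h2 := IH.2 (j : Int) (by positivity) (by omega)
          (by rw [Nat.add_sub_cancel]; exact hne)
        simp only [Nat.add_sub_cancel] at h2
        rw [h2, pvOutB_step ts ls n j hjn]
        have hsp : pvStartP ts j = true := by
          unfold pvStartP
          rw [hch]
          simp only [Bool.not_false, Bool.and_true, bne_iff_ne, ne_eq]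
          exact hne
        rw [hsp, pvSkipRun ts ls n j (by omega)]
        simp
      refine ⟨fun hcl => ?_, fun s hs h1 hprev => ?_⟩
      · -- closed state at j
        have hch : pvChained ts j = false := by
          unfold pvChained
          rcases hcl with rfl | hO
          · simp
          · rw [hO]
            simp
        rw [pvRunA, dif_pos hjn]
        by_cases hO : (ts.getD j "" == "O") = true
        · have hOeq : ts.getD j "" = "O" := by simpa using hO
          have hneg : ¬ ((-1 : Int) ≥ 0) := by norm_num
          rw [if_pos hO, if_neg hneg]
          have hcl' := IH.1 (Or.inr (by rw [Nat.add_sub_cancel]; exact hOeq))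
          rw [hcl', pvOutB_step ts ls n j hjn]
          have hsp : pvStartP ts j = false := by
            unfold pvStartP
            rw [hOeq]
            simp
          rw [hsp]
          simp
        · have hne : ts.getD j "" ≠ "O" := by simpa using hO
          have hneg : ¬ ((-1 : Int) ≥ 0) := by norm_num
          rw [if_neg (by simpa using hO)]
          by_cases hB : PySem.Str.startswith (ts.getD j "") "B" = true
          · rw [if_pos hB, if_neg hneg]
            exact hopen hne hch
          · rw [if_neg hB,
              if_pos (show some (PySem.Str.slice (ts.getD j "") (some 2) none) ≠ none by simp),
              if_neg hneg]
            exact hopen hne hch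
      · -- open state at j with label = slice of previous tag
        rw [pvRunA, dif_pos hjn]
        by_cases hO : (ts.getD j "" == "O") = true
        · -- tag "O": close the span at j
          have hOeq : ts.getD j "" = "O" := by simpa using hO
          have hch : pvChained ts j = false := by
            unfold pvChained
            rw [hOeq]
            simp
          have he : pvFindEnd ts n j = j :=
            pvFindEnd_eq_self ts n j (by simp [hch])
          rw [if_pos hO, if_pos hs, he]
          have hcl' := IH.1 (Or.inr (by rw [Nat.add_sub_cancel]; exact hOeq))
          rw [hcl', pvOutB_step ts ls n j hjn]
          have hsp : pvStartP ts j = false := by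
            unfold pvStartP
            rw [hOeq]
            simp
          rw [hsp]
          simp [hjn]
        · have hne : ts.getD j "" ≠ "O" := by simpa using hO
          rw [if_neg (by simpa using hO)]
          by_cases hB : PySem.Str.startswith (ts.getD j "") "B" = true
          · -- "B" tag: close at j and open a new span
            have hch : pvChained ts j = false := by
              unfold pvChained
              rw [hB]
              simp
            have he : pvFindEnd ts n j = j :=
              pvFindEnd_eq_self ts n j (by simp [hch])
            rw [if_pos hB, if_pos hs, hopen hne hch, he]
            simp [hjn]
          · rw [if_neg hB]
            by_cases hEq : PySem.Str.slice (ts.getD j "") (some 2) none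
                = PySem.Str.slice (ts.getD (j - 1) "") (some 2) none
            · -- continuation: labels match, span stays open
              have hch : pvChained ts j = true := by
                unfold pvChained
                rw [hEq]
                simp only [Bool.and_eq_true, decide_eq_true_eq, bne_iff_ne, ne_eq,
                  Bool.not_eq_true', beq_self_eq_true, and_true]
                exact ⟨⟨⟨by omega, hprev⟩, hne⟩, Bool.eq_false_iff.mpr hB⟩
              have he : pvFindEnd ts n j = pvFindEnd ts n (j + 1) :=
                pvFindEnd_eq_of_chained ts n j ⟨hjn, hch⟩
              rw [if_neg (show ¬ (some (PySem.Str.slice (ts.getD j "") (some 2) none)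
                  ≠ some (PySem.Str.slice (ts.getD (j - 1) "") (some 2) none)) from by
                rw [hEq]; simp)]
              have h2 := IH.2 s hs (by omega) (by rw [Nat.add_sub_cancel]; exact hne)
              simp only [Nat.add_sub_cancel] at h2
              rw [← hEq, h2, he]
            · -- label mismatch: close at j and open a new span
              have hch : pvChained ts j = false := by
                unfold pvChained
                rw [beq_eq_false_iff_ne.mpr hEq]
                simp
              have he : pvFindEnd ts n j = j :=
                pvFindEnd_eq_self ts n j (by simp [hch])
              rw [if_pos (show some (PySem.Str.slice (ts.getD j "") (some 2) none)
                  ≠ some (PySem.Str.slice (ts.getD (j - 1) "") (some 2) none) from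
                  fun hco => hEq (Option.some.inj hco)), if_pos hs, hopen hne hch, he]
              simp [hjn]
    · have hjeq : j = n := by omega
      subst hjeq
      have hstop : ¬ j < j := lt_irrefl j
      refine ⟨fun _ => ?_, fun s hs h1 hprev => ?_⟩
      · rw [pvRunA_stop ts ls j j hstop, pvOutB_stop ts ls j j hstop]
      · have he : pvFindEnd ts j j = j := pvFindEnd_eq_self ts j j (by simp)
        rw [pvRunA_stop ts ls j j hstop, he, pvOutB_stop ts ls j j hstop]
        simp

-- ===== VERDICT (by name: the statement is the Claim_ definition above) =====
theorem conll_tags_to_spans_py_spec : Claim_equal_conll_tags_to_spans_py := by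
  intro tags links _
  unfold Spec_conll_tags_to_spans_py conll_tags_to_spans_py conll_tags_to_spans_py_alt
  simp only []
  rw [pvFoldA, List.nil_append]
  have h0 : PySem.List.enumerate ((tags ++ ["O"]).zip (links ++ ["O"])) 0
      = PySem.List.enumerate (((tags ++ ["O"]).zip (links ++ ["O"])).drop 0) ((0 : Nat) : Int) := by
    norm_num
  rw [h0, pvBridgeA (tags ++ ["O"]) (links ++ ["O"])
      (min (tags ++ ["O"]).length (links ++ ["O"]).length) rfl 0 (-1) none]
  rw [(pvMain (tags ++ ["O"]) (links ++ ["O"])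
      (min (tags ++ ["O"]).length (links ++ ["O"]).length) (min_le_left _ _) 0
      (Nat.zero_le _)).1 (Or.inl rfl)]
  unfold pvOutB pvStartP
  simp [List.range_eq_range']
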